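-- pv_equiv track=rewrite | github.com/DavidSvejda2507/ThesisTemporalGraphs | LeidenConsistency.py | renumber
-- ===== SOURCE A (Python) =====
-- def renumber(lst):
--     dct = {}
--     i = 0
--     out = [None] * len(lst)
--     for j, val in enumerate(lst):
--         if dct.get(val, -1) == -1:
--             dct[val] = i
--             i += 1
--         out[j] = dct[val]
--     return out
-- ===== SOURCE B (Python) =====
-- def renumber(lst):
--     # Rank-of-first-occurrence algorithm: no dict and no incremental label counter.
--     # pos[j] = position of the first occurrence of lst[j]; the label of lst[j] is the
--     # rank of pos[j] among the sorted set of first-occurrence positions (ranks are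
--     # consecutive from 0, and first-appearance order = order of those positions).
--     pos = [lst.index(v) for v in lst]
--     firsts = sorted(set(pos))
--     rank = [0] * len(lst)
--     for i, p in enumerate(firsts):
--         rank[p] = i
--     return [rank[p] for p in pos]
-- ===== Notes on version B (the rewrite author's own statement) =====
-- stated objective: alternative
-- what changed: A labels values in one pass with a value-to-label dict and a running counter; B uses no dict at all: it computes each element's first-occurrence position, sorts the set of those positions, ranks them through a position-indexed array, and emits the ranks (first-appearance order equals the order of first-occurrence positions).
import Mathlib
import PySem

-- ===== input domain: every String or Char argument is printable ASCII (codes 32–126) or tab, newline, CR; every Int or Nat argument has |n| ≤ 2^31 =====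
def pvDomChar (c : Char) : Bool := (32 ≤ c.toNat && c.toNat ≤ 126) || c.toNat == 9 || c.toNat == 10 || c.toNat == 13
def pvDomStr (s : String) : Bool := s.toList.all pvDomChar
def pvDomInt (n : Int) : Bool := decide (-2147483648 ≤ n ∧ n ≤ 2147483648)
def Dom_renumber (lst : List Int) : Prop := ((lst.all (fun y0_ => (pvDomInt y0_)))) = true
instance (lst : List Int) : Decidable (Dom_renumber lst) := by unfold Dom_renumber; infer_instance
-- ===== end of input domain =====

-- B replaces A's one-pass dict-and-counter labelling by a rank-of-first-occurrence algorithm: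
-- first-occurrence positions, sorted as a set, ranked through a position-indexed array; no dict.

-- ===== PORT A =====
-- A's for-loop over (j, val): state (dct, i, out). out[j] is written in increasing j, so the
-- preallocated [None]*len(lst) plus in-order writes is ported as appending to out.
-- 'out[j] = dct[val]' is ported as (dct.get? val).getD 0; dct[val] is always present there (the
-- then-branch has just inserted it), so the .getD 0 default is never used.
def renumberLoopA : List Int → PySem.Dict Int Int → Int → List Int → List Int
  | [], _, _, out => out
  | v :: t, dct, i, out =>
    if PySem.Dict.getD dct v (-1) == -1 then
      renumberLoopA t (dct.insert v i) (i + 1) (out ++ [((dct.insert v i).get? v).getD 0])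
    else
      renumberLoopA t dct i (out ++ [(dct.get? v).getD 0])

def renumber (lst : List Int) : List Int :=
  renumberLoopA lst PySem.Dict.empty 0 []

-- ===== PORT B =====
-- 'lst.index(v)' is ported as (index? lst v).map cast |>.getD 0; v is drawn from lst so the
-- lookup always succeeds and the .getD 0 default is never used. sorted(set(pos)) is
-- PySem.List.sorted (PySem.Set.ofList pos) id false. 'rank[p] = i' is ported as List.set at
-- p.toNat (exact here: every p is a first-occurrence position, 0 <= p < len(lst)); the read
-- 'rank[p]' is PySem.List.pyGet? with .getD 0, and the index is always in range.
def renumber_alt (lst : List Int) : List Int :=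
  let pos := lst.map (fun v => ((PySem.List.index? lst v).map (fun k => (k : Int))).getD 0)
  let firsts := PySem.List.sorted (PySem.Set.ofList pos) (fun x => x) false
  let rank := (PySem.List.enumerate firsts).foldl
      (fun a ip => a.set ip.2.toNat ip.1) (List.replicate lst.length (0 : Int))
  pos.map (fun p => (PySem.List.pyGet? rank p).getD 0)

-- ===== PRECONDITION & SPEC =====
def Spec_renumber (lst : List Int) (out : List Int) : Prop := out = renumber_alt lst
instance (lst : List Int) (out : List Int) : Decidable (Spec_renumber lst out) := by unfold Spec_renumber; infer_instance

-- ===== CLAIM (what is proved, stated in full; the proofs are below) =====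
def Claim_equal_renumber : Prop := ∀ (lst : List Int), Dom_renumber lst → Spec_renumber lst (renumber lst)

-- ===== LEMMAS AND PROOFS =====

-- index? is stable under appending elements to the right of a list that already contains v
lemma index?_append_left (s r : List Int) (v : Int) (h : v ∈ s) :
    PySem.List.index? (s ++ r) v = PySem.List.index? s v := by
  induction s with
  | nil => simp at h
  | cons x s ih =>
    by_cases hx : x = v
    · subst hx; simp [PySem.List.index?_eq_idxOf?, List.idxOf?, List.findIdx?_cons]
    · rw [List.cons_append, PySem.List.index?_cons_of_ne (s ++ r) hx,
        PySem.List.index?_cons_of_ne s hx, ih (List.mem_of_ne_of_mem (fun he => hx he.symm) h)]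

-- Set.update only appends elements to the right
lemma update_eq_append (t : List Int) : ∀ (s : PySem.Set Int), ∃ r, PySem.Set.update s t = s ++ r := by
  induction t with
  | nil => intro s; exact ⟨[], by simp [PySem.Set.update]⟩
  | cons x t ih =>
    intro s
    have hs : PySem.Set.update s (x :: t) = PySem.Set.update (PySem.Set.add s x) t := by
      simp [PySem.Set.update]
    obtain ⟨r, hr⟩ := ih (PySem.Set.add s x)
    by_cases hx : x ∈ s
    · exact ⟨r, by rw [hs, hr]; simp [PySem.Set.add, PySem.Set.contains, hx]⟩
    · exact ⟨x :: r, by rw [hs, hr]; simp [PySem.Set.add, PySem.Set.contains, hx]⟩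

lemma index?_update (s : PySem.Set Int) (t : List Int) (v : Int) (h : v ∈ s) :
    PySem.List.index? (PySem.Set.update s t) v = PySem.List.index? s v := by
  obtain ⟨r, hr⟩ := update_eq_append t s
  rw [hr, index?_append_left s r v h]

-- the label A's loop assigns equals the first-appearance index in the final dedup list
lemma loopA_eq (rest : List Int) : ∀ (s : List Int) (dct : PySem.Dict Int Int) (out : List Int),
    s.Nodup →
    (∀ v, dct.get? v = (PySem.List.index? s v).map (fun k => (k : Int))) →
    renumberLoopA rest dct (s.length : Int) out
      = out ++ rest.map (fun v =>
          ((PySem.List.index? (PySem.Set.update s rest) v).map (fun k => (k : Int))).getD 0) := by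
  induction rest with
  | nil => intro s dct out _ _; simp [renumberLoopA]
  | cons v t ih =>
    intro s dct out hnd hinv
    have hupd : PySem.Set.update s (v :: t) = PySem.Set.update (PySem.Set.add s v) t := by
      simp [PySem.Set.update]
    by_cases hv : v ∈ s
    · -- old value: else-branch, set unchanged
      obtain ⟨k, hk⟩ : ∃ k, PySem.List.index? s v = some k := by
        simpa [PySem.List.index?_eq_idxOf?, List.isSome_idxOf?, Option.isSome_iff_exists] using
          (List.isSome_idxOf?.2 hv)
      have hadd : PySem.Set.add s v = s := by
        simp [PySem.Set.add, PySem.Set.contains, hv]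
      have hgd : PySem.Dict.getD dct v (-1) = (k : Int) := by
        rw [PySem.Dict.getD_eq_get?_getD, hinv v, hk]; rfl
      have hne : (PySem.Dict.getD dct v (-1) == (-1 : Int)) = false := by
        rw [hgd]
        simp
      rw [renumberLoopA, hne]
      simp only [Bool.false_eq_true, if_false]
      rw [ih s dct _ hnd hinv, hupd, hadd]
      have hidx : PySem.List.index? (PySem.Set.update s t) v = some k := by
        rw [index?_update s t v hv, hk]
      have hhead : ((dct.get? v).getD 0)
          = ((PySem.List.index? (PySem.Set.update s t) v).map (fun k => (k : Int))).getD 0 := by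
        rw [hinv v, hk, hidx]
      simp only [List.map_cons, List.append_assoc, List.singleton_append, hhead]
    · -- fresh value: then-branch, label s.length, set grows to s ++ [v]
      have hnone : PySem.List.index? s v = none := by
        simp [PySem.List.index?_eq_idxOf?, List.idxOf?_eq_none_iff, hv]
      have hgd : (PySem.Dict.getD dct v (-1) == (-1 : Int)) = true := by
        rw [PySem.Dict.getD_eq_get?_getD, hinv v, hnone]; rfl
      rw [renumberLoopA, hgd]
      simp only [if_true]
      have hadd : PySem.Set.add s v = s ++ [v] := by
        simp [PySem.Set.add, PySem.Set.contains, hv]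
      have hnd' : (s ++ [v]).Nodup := by
        exact hnd.append (List.nodup_singleton v) (List.disjoint_singleton.2 hv)
      have hinv' : ∀ w, (dct.insert v (s.length : Int)).get? w
          = (PySem.List.index? (s ++ [v]) w).map (fun k => (k : Int)) := by
        intro w
        by_cases hw : w = v
        · rw [hw, PySem.Dict.get?_insert_self dct v _,
            PySem.List.index?_append_singleton_self s v hv]
          rfl
        · have hsnoc : PySem.List.index? (s ++ [v]) w = PySem.List.index? s w := by
            by_cases hws : w ∈ s
            · exact index?_append_left s [v] w hws
            · have h1 : PySem.List.index? s w = none := by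
                simp [PySem.List.index?_eq_idxOf?, List.idxOf?_eq_none_iff, hws]
              have h2 : PySem.List.index? (s ++ [v]) w = none := by
                simp [PySem.List.index?_eq_idxOf?, List.idxOf?_eq_none_iff, hws, hw]
              rw [h1, h2]
          rw [PySem.Dict.get?_insert_of_ne dct _ hw, hinv w, hsnoc]
      have hlen : (s.length : Int) + 1 = ((s ++ [v]).length : Int) := by
        simp
      rw [hlen, ih (s ++ [v]) _ _ hnd' hinv', hupd, hadd]
      have hidx : PySem.List.index? (PySem.Set.update (s ++ [v]) t) v = some s.length := by
        rw [index?_update (s ++ [v]) t v (by simp), PySem.List.index?_append_singleton_self s v hv]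
      have hhead : (((dct.insert v (s.length : Int)).get? v).getD 0)
          = ((PySem.List.index? (PySem.Set.update (s ++ [v]) t) v).map (fun k => (k : Int))).getD 0 := by
        rw [PySem.Dict.get?_insert_self dct v _, hidx]
        rfl
      simp only [List.map_cons, List.append_assoc, List.singleton_append, hhead]

-- first-occurrence index of v in lst (the value of Python's lst.index(v) when v ∈ lst)
def fidx (lst : List Int) (v : Int) : Nat := (PySem.List.index? lst v).getD 0

lemma map_cast_getD (o : Option Nat) :
    (o.map (fun k => (k : Int))).getD 0 = ((o.getD 0 : Nat) : Int) := by
  cases o <;> simp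

lemma index?_eq_some_fidx (lst : List Int) (v : Int) (hv : v ∈ lst) :
    PySem.List.index? lst v = some (fidx lst v) := by
  obtain ⟨k, hk⟩ : ∃ k, PySem.List.index? lst v = some k := by
    simpa [PySem.List.index?_eq_idxOf?, Option.isSome_iff_exists] using
      (List.isSome_idxOf?.2 hv)
  unfold fidx; rw [hk]
  rfl

lemma fidx_lt (lst : List Int) (v : Int) (hv : v ∈ lst) : fidx lst v < lst.length := by
  obtain ⟨hk, _, _⟩ :=
    PySem.List.getElem_of_index?_eq_some (index?_eq_some_fidx lst v hv)
  exact hk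

lemma getElem_fidx (lst : List Int) (v : Int) (hv : v ∈ lst) :
    lst[fidx lst v]'(fidx_lt lst v hv) = v := by
  obtain ⟨hk, he, _⟩ :=
    PySem.List.getElem_of_index?_eq_some (index?_eq_some_fidx lst v hv)
  exact he

lemma fidx_inj (lst : List Int) (a b : Int) (ha : a ∈ lst) (hb : b ∈ lst)
    (h : fidx lst a = fidx lst b) : a = b := by
  have h1 := getElem_fidx lst a ha
  have h2 := getElem_fidx lst b hb
  rw [← h1, ← h2]
  simp [h]

lemma fidx_append_of_mem (l t : List Int) (v : Int) (hv : v ∈ l) :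
    fidx (l ++ t) v = fidx l v := by
  unfold fidx; rw [PySem.List.index?_append_of_mem t hv]

lemma fidx_append_singleton_self (l : List Int) (x : Int) (hx : x ∉ l) :
    fidx (l ++ [x]) x = l.length := by
  unfold fidx; rw [PySem.List.index?_append_singleton_self l x hx]; rfl

-- set-of-a-map for a function injective on the list
lemma ofList_map_inj (g : Int → Int) (xs : List Int)
    (hg : ∀ a ∈ xs, ∀ b ∈ xs, g a = g b → a = b) :
    PySem.Set.ofList (xs.map g) = (PySem.Set.ofList xs).map g := by
  induction xs using List.reverseRecOn with
  | nil => rfl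
  | append_singleton l x ih =>
    have hg' : ∀ a ∈ l, ∀ b ∈ l, g a = g b → a = b := fun a ha b hb =>
      hg a (by simp [ha]) b (by simp [hb])
    have h1 : PySem.Set.ofList ((l ++ [x]).map g)
        = PySem.Set.add (PySem.Set.ofList (l.map g)) (g x) := by
      simp [PySem.Set.ofList_eq_foldl, List.foldl_append]
    have h2 : PySem.Set.ofList (l ++ [x])
        = PySem.Set.add (PySem.Set.ofList l) x := by
      simp [PySem.Set.ofList_eq_foldl, List.foldl_append]
    rw [h1, h2, ih hg']
    by_cases hx : x ∈ PySem.Set.ofList l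
    · have hgx : g x ∈ (PySem.Set.ofList l).map g := List.mem_map_of_mem hx
      simp [PySem.Set.add, PySem.Set.contains, hx, hgx]
    · have hgx : g x ∉ (PySem.Set.ofList l).map g := by
        intro hmem
        obtain ⟨y, hy, hyg⟩ := List.mem_map.1 hmem
        have : y = x := hg y (List.mem_append_left _ ((PySem.Set.mem_ofList _ _).1 hy)) x
          (List.mem_append_right _ (by simp)) hyg
        exact hx (this ▸ hy)
      simp [PySem.Set.add, PySem.Set.contains, hx, hgx]

-- the first-occurrence positions of the distinct values, in first-appearance order,
-- are strictly increasing
lemma pairwise_dedup_fidx (lst : List Int) :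
    ((PySem.List.dedup lst).map (fun v => ((fidx lst v : Nat) : Int))).Pairwise (· < ·) := by
  induction lst using List.reverseRecOn with
  | nil => simp [PySem.List.dedup_eq_ofList]
  | append_singleton l x ih =>
    have hded : PySem.List.dedup (l ++ [x]) = PySem.Set.add (PySem.List.dedup l) x := by
      simp [PySem.List.dedup_eq_ofList, PySem.Set.ofList_eq_foldl, List.foldl_append]
    have hmap : ((PySem.List.dedup l).map (fun v => ((fidx (l ++ [x]) v : Nat) : Int)))
        = ((PySem.List.dedup l).map (fun v => ((fidx l v : Nat) : Int))) := by
      apply List.map_congr_left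
      intro v hv
      rw [fidx_append_of_mem l [x] v ((PySem.List.mem_dedup _ _).1 hv)]
    by_cases hx : x ∈ l
    · have : PySem.Set.add (PySem.List.dedup l) x = PySem.List.dedup l := by
        simp [PySem.Set.add, PySem.Set.contains, PySem.List.dedup_eq_ofList,
          PySem.Set.mem_ofList, hx]
      rw [hded, this, hmap]
      exact ih
    · have : PySem.Set.add (PySem.List.dedup l) x = PySem.List.dedup l ++ [x] := by
        simp [PySem.Set.add, PySem.Set.contains, PySem.List.dedup_eq_ofList,
          PySem.Set.mem_ofList, hx]
      rw [hded, this, List.map_append, List.map_singleton, fidx_append_singleton_self l x hx]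
      rw [List.pairwise_append]
      refine ⟨by rw [hmap]; exact ih, List.pairwise_singleton _ _, ?_⟩
      intro a ha b hb
      rw [List.mem_singleton.1 hb]
      obtain ⟨v, hv, hva⟩ := List.mem_map.1 ha
      rw [← hva, fidx_append_of_mem l [x] v ((PySem.List.mem_dedup _ _).1 hv)]
      exact_mod_cast fidx_lt l v ((PySem.List.mem_dedup _ _).1 hv)

-- the rank-array fold: entry k of fs ends up storing s + k
lemma foldl_set_length (l : List (Int × Int)) : ∀ (a : List Int),
    (l.foldl (fun a ip => a.set ip.2.toNat ip.1) a).length = a.length := by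
  induction l with
  | nil => intro a; rfl
  | cons p t ih => intro a; rw [List.foldl_cons, ih]; exact List.length_set ..

lemma rank_fold_get (fs : List Int) : ∀ (a : List Int) (s : Int) (k : Nat), k < fs.length →
    fs.Nodup → (∀ q ∈ fs, 0 ≤ q ∧ q.toNat < a.length) →
    ((PySem.List.enumerate fs s).foldl (fun a ip => a.set ip.2.toNat ip.1) a)[(fs[k]!).toNat]?
      = some (s + (k : Int)) := by
  induction fs using List.reverseRecOn with
  | nil => intro a s k hk _ _; simp at hk
  | append_singleton l x ih =>
    intro a s k hk hnd hbd
    obtain ⟨hndl, -, hdisj⟩ := List.nodup_append.1 hnd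
    rw [PySem.List.enumerate_append, List.foldl_append]
    simp only [PySem.List.enumerate_cons, PySem.List.enumerate_nil,
      List.foldl_cons, List.foldl_nil]
    by_cases hkl : k < l.length
    · -- earlier entry: the final set at x.toNat does not touch it
      have hmem : l[k]! = l[k]'hkl := getElem!_pos l k hkl
      have hxmem : x ∉ l := fun hx' => hdisj x hx' x (by simp) rfl
      have hxk : x ≠ l[k]'hkl := fun he => hxmem (he ▸ List.getElem_mem hkl)
      have hx0 : 0 ≤ x := (hbd x (by simp)).1
      have hk0 : 0 ≤ l[k]'hkl := (hbd _ (by exact List.mem_append_left [x] (List.getElem_mem hkl))).1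
      have hne : x.toNat ≠ (l[k]'hkl).toNat := by omega
      have hgl : (l ++ [x])[k]! = l[k]'hkl := by
        rw [getElem!_pos (l ++ [x]) k (by simp; omega), List.getElem_append_left hkl]
      rw [hgl, List.getElem?_set_ne hne]
      have hih := ih a s k hkl hndl (fun q hq => hbd q (List.mem_append_left [x] hq))
      rw [hmem] at hih
      exact hih
    · -- the new last entry
      have hkeq : k = l.length := by simp at hk; omega
      subst hkeq
      have hget : (l ++ [x])[l.length]! = x := by
        rw [getElem!_pos (l ++ [x]) l.length (by simp)]; simp
      rw [hget]
      have hlen : x.toNat < ((PySem.List.enumerate l s).foldl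
          (fun a ip => a.set ip.2.toNat ip.1) a).length := by
        rw [foldl_set_length]
        exact (hbd x (by simp)).2
      rw [List.getElem?_set_self hlen]

-- ===== VERDICT (by name: the statement is the Claim_ definition above) =====
theorem renumber_spec : Claim_equal_renumber := by
  intro lst _
  unfold Spec_renumber renumber
  simp only [renumber_alt]
  have hA := loopA_eq lst [] PySem.Dict.empty [] List.nodup_nil
    (fun v => by simp [PySem.Dict.get?_empty, PySem.List.index?_eq_idxOf?])
  simp only [List.length_nil, Nat.cast_zero, List.nil_append] at hA
  rw [hA]
  have hupd : PySem.Set.update ([] : PySem.Set Int) lst = PySem.List.dedup lst := by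
    simp [PySem.Set.update, PySem.List.dedup_eq_ofList, PySem.Set.ofList_eq_foldl]
  rw [hupd]
  -- name the pieces of B
  have hpos : lst.map (fun v => ((PySem.List.index? lst v).map (fun k => (k : Int))).getD 0)
      = lst.map (fun v => ((fidx lst v : Nat) : Int)) := by
    apply List.map_congr_left
    intro v _
    rw [map_cast_getD]
    rfl
  rw [hpos]
  have hset : PySem.Set.ofList (lst.map (fun v => ((fidx lst v : Nat) : Int)))
      = (PySem.List.dedup lst).map (fun v => ((fidx lst v : Nat) : Int)) := by
    rw [ofList_map_inj _ lst (fun a ha b hb h => fidx_inj lst a b ha hb (by exact_mod_cast h))]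
    rw [PySem.List.dedup_eq_ofList]
  rw [hset]
  have hsorted := PySem.List.sorted_eq_of_perm_of_pairwise_lt
    ((PySem.List.dedup lst).map (fun v => ((fidx lst v : Nat) : Int)))
    ((PySem.List.dedup lst).map (fun v => ((fidx lst v : Nat) : Int)))
    (fun x => x) (List.Perm.refl _) (pairwise_dedup_fidx lst)
  rw [hsorted]
  rw [List.map_map]
  apply List.map_congr_left
  intro v hv
  simp only [Function.comp]
  -- A's label: index of v in the dedup list
  have hvd : v ∈ PySem.List.dedup lst := (PySem.List.mem_dedup _ _).2 hv
  set d := PySem.List.dedup lst with hd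
  obtain ⟨k, hk⟩ : ∃ k, PySem.List.index? d v = some k := by
    simpa [PySem.List.index?_eq_idxOf?, Option.isSome_iff_exists] using
      (List.isSome_idxOf?.2 hvd)
  obtain ⟨hklt, hdk, -⟩ := PySem.List.getElem_of_index?_eq_some hk
  -- B's label: the rank array read at v's first-occurrence position
  set fs := d.map (fun v => ((fidx lst v : Nat) : Int)) with hfs
  have hklt' : k < fs.length := by simp [hfs, hklt]
  have hfsk : fs[k]! = ((fidx lst v : Nat) : Int) := by
    rw [getElem!_pos fs k hklt']
    simp [hfs, List.getElem_map, hdk]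
  have hbd : ∀ q ∈ fs, 0 ≤ q ∧ q.toNat < (List.replicate lst.length (0 : Int)).length := by
    intro q hq
    obtain ⟨w, hw, hwq⟩ := List.mem_map.1 hq
    have hwl : w ∈ lst := (PySem.List.mem_dedup _ _).1 (hd ▸ hw)
    constructor
    · rw [← hwq]; positivity
    · rw [← hwq]
      simpa using fidx_lt lst w hwl
  have hndfs : fs.Nodup :=
    (pairwise_dedup_fidx lst).imp (fun h => ne_of_lt h)
  have hrank := rank_fold_get fs (List.replicate lst.length (0 : Int)) 0 k hklt' hndfs hbd
  rw [hfsk] at hrank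
  simp only [Int.toNat_natCast] at hrank
  rw [PySem.List.pyGet?_natCast, hrank]
  rw [hk]
  simp
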